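-- pv_equiv track=rewrite | github.com/HeyJunie/GroupStudy | 06_09/09.py | solution
-- ===== SOURCE A (Python) =====
-- import heapq
--
-- def solution(nums):
--     answer = []
--     maxH = []
--     for x in nums:
--         if x == 0:
--             if len(maxH) == 0:
--                 answer.append(-1)
--             else:
--                 answer.append(-heapq.heappop(maxH))
--         else:
--             heapq.heappush(maxH, -x)
--     return answer
-- ===== SOURCE B (Python) =====
-- def solution(nums):
--     answer = []
--     maxH = []
--     for x in nums:
--         if x != 0:
--             maxH.append(x)
--         elif not maxH:
--             answer.append(-1)
--         else:
--             m = max(maxH)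
--             maxH.remove(m)
--             answer.append(m)
--     return answer
-- ===== Notes on version B (the rewrite author's own statement) =====
-- stated objective: simpler
-- what changed: Replaces the negated min-heap (heapq push/pop with sift operations) by a plain list: positives are appended, and each zero does a linear max() scan plus remove() instead of a heap extraction.
import Mathlib
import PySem

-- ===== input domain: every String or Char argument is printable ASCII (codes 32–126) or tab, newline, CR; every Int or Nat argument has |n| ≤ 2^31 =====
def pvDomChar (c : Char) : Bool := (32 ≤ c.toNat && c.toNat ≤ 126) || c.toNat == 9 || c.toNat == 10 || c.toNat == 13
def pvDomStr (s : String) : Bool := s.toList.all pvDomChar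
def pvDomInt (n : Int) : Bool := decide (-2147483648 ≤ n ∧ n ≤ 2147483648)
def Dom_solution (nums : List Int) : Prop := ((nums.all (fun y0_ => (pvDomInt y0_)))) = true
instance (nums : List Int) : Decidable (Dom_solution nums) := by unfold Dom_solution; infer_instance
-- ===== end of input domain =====

-- B replaces the negated min-heap by a plain list with a linear max()/remove() scan per zero (simpler, not faster).

-- ===== PORT A =====
-- helpers: a literal port of CPython's heapq (heap as an array/List of Int, 0-based);
-- hget h i is heap[i] (every read is guarded in range, so the default is never returned)

def hget (h : List Int) (i : Nat) : Int := h.getD i 0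

-- heapq._siftdown(heap, 0, pos) with newitem = heap[pos] (bubble-up; startpos is always 0 here).
-- fuel only bounds the recursion (pos strictly decreases, so fuel = pos always suffices)
def siftdownF : Nat → List Int → Nat → Int → List Int
  | fuel + 1, h, pos, newitem =>
    if 0 < pos then
      if newitem < hget h ((pos - 1) / 2) then
        siftdownF fuel (h.set pos (hget h ((pos - 1) / 2))) ((pos - 1) / 2) newitem
      else h.set pos newitem
    else h.set pos newitem
  | 0, h, pos, newitem => h.set pos newitem

def siftdown (h : List Int) (pos : Nat) (newitem : Int) : List Int :=
  siftdownF pos h pos newitem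

-- the child index _siftup moves to: the right child iff it exists and heap[left] < heap[right] fails
def childSel (h : List Int) (pos : Nat) : Nat :=
  if 2*pos+1+1 < h.length ∧ ¬ (hget h (2*pos+1) < hget h (2*pos+1+1)) then 2*pos+1+1 else 2*pos+1

-- heapq._siftup(heap, pos) with newitem = heap[pos] (move the hole down to a leaf, then _siftdown
-- back up).  fuel only bounds the recursion (h.length - pos strictly decreases; fuel = h.length suffices,
-- and with fuel 0 the hole has no children, which is the else branch)
def siftupF : Nat → List Int → Nat → Int → List Int
  | fuel + 1, h, pos, newitem =>
    if 2*pos+1 < h.length then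
      siftupF fuel (h.set pos (hget h (childSel h pos))) (childSel h pos) newitem
    else siftdown (h.set pos newitem) pos newitem
  | 0, h, pos, newitem => siftdown (h.set pos newitem) pos newitem

def siftup (h : List Int) (pos : Nat) (newitem : Int) : List Int :=
  siftupF h.length h pos newitem

-- heapq.heappush
def heappush (h : List Int) (item : Int) : List Int :=
  siftdown (h ++ [item]) h.length item

-- heapq.heappop (only called on a nonempty heap; returns (popped item, new heap))
def heappop (h : List Int) : Int × List Int :=
  if h.dropLast.isEmpty then (hget h (h.length - 1), h.dropLast)
  else (hget h.dropLast 0,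
        siftup (h.dropLast.set 0 (hget h (h.length - 1))) 0 (hget h (h.length - 1)))

def stepA (st : List Int × List Int) (x : Int) : List Int × List Int :=
  if x == 0 then
    if st.2.length == 0 then (st.1 ++ [-1], st.2)
    else (st.1 ++ [-(heappop st.2).1], (heappop st.2).2)
  else (st.1, heappush st.2 (-x))

def solution (nums : List Int) : List Int :=
  (nums.foldl stepA ([], [])).1

-- ===== PORT B =====
def stepB (st : List Int × List Int) (x : Int) : List Int × List Int :=
  if x ≠ 0 then (st.1, st.2 ++ [x])
  else if st.2.isEmpty then (st.1 ++ [-1], st.2)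
  else (st.1 ++ [(PySem.List.max? st.2 (fun y => y)).getD 0],
        (PySem.List.remove? st.2 ((PySem.List.max? st.2 (fun y => y)).getD 0)).getD st.2)

def solution_alt (nums : List Int) : List Int :=
  (nums.foldl stepB ([], [])).1

-- ===== PRECONDITION & SPEC =====
def Spec_solution (nums : List Int) (out : List Int) : Prop := out = solution_alt nums
instance (nums : List Int) (out : List Int) : Decidable (Spec_solution nums out) := by unfold Spec_solution; infer_instance

-- ===== CLAIM (what is proved, stated in full; the proofs are below) =====
def Claim_equal_solution : Prop := ∀ (nums : List Int), Dom_solution nums → Spec_solution nums (solution nums)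

-- ===== LEMMAS AND PROOFS =====

-- the min-heap property of the array representation: every non-root cell is ≥ its parent
def IsHeap (h : List Int) : Prop :=
  ∀ c, 0 < c → c < h.length → hget h ((c - 1) / 2) ≤ hget h c

theorem hget_set_self (h : List Int) (i : Nat) (v : Int) (hi : i < h.length) :
    hget (h.set i v) i = v := by
  simp [hget, List.getD_eq_getElem?_getD, hi]

theorem hget_set_ne (h : List Int) (i j : Nat) (v : Int) (hij : i ≠ j) :
    hget (h.set i v) j = hget h j := by
  simp [hget, List.getD_eq_getElem?_getD, List.getElem?_set_ne hij]

-- writing a at the front and b into cell k is, up to permutation, symmetric in a and b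
theorem set_swap_perm (t : List Int) (k : Nat) (a b : Int) (hk : k < t.length) :
    (a :: t.set k b).Perm (b :: t.set k a) := by
  induction t generalizing k with
  | nil => simp at hk
  | cons y s ih =>
    cases k with
    | zero => simpa using List.Perm.swap b a s
    | succ k =>
      have hk' : k < s.length := by simpa using hk
      have h1 : (a :: y :: s.set k b).Perm (y :: a :: s.set k b) := List.Perm.swap y a _
      have h2 : (y :: a :: s.set k b).Perm (y :: b :: s.set k a) := List.Perm.cons y (ih k hk')
      have h3 : (y :: b :: s.set k a).Perm (b :: y :: s.set k a) := List.Perm.swap b y _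
      simpa using (h1.trans h2).trans h3

theorem transfer_perm (l : List Int) (i j : Nat) (v : Int)
    (hij : i ≠ j) (hi : i < l.length) (hj : j < l.length) :
    ((l.set i (hget l j)).set j v).Perm (l.set i v) := by
  induction l generalizing i j with
  | nil => simp at hi
  | cons x t ih =>
    cases i with
    | zero =>
      cases j with
      | zero => omega
      | succ j =>
        have hj' : j < t.length := by simpa using hj
        have hx : hget (x :: t) (j+1) = hget t j := by simp [hget]
        rw [hx]
        simp only [List.set_cons_zero, List.set_cons_succ]
        have hset : t.set j (hget t j) = t := by
          rw [hget, List.getD_eq_getElem t 0 hj']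
          exact List.set_getElem_self hj'
        have := set_swap_perm t j (hget t j) v hj'
        rw [hset] at this
        exact this
    | succ i =>
      cases j with
      | zero =>
        have hi' : i < t.length := by simpa using hi
        have hx : hget (x :: t) 0 = x := by simp [hget]
        rw [hx]
        simp only [List.set_cons_zero, List.set_cons_succ]
        exact set_swap_perm t i v x hi'
      | succ j =>
        have hi' : i < t.length := by simpa using hi
        have hj' : j < t.length := by simpa using hj
        have hx : hget (x :: t) (j+1) = hget t j := by simp [hget]
        rw [hx]
        simp only [List.set_cons_succ]
        exact List.Perm.cons x (ih i j (by omega) hi' hj')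

theorem childSel_lt (h : List Int) (pos : Nat) (hc : 2*pos+1 < h.length) :
    childSel h pos < h.length := by unfold childSel; split <;> omega

theorem childSel_gt (h : List Int) (pos : Nat) : pos < childSel h pos := by
  unfold childSel; split <;> omega

theorem childSel_parent (h : List Int) (pos : Nat) : (childSel h pos - 1) / 2 = pos := by
  unfold childSel; split <;> omega

theorem childSel_min (h : List Int) (pos : Nat) (s : Nat)
    (hs : 0 < s) (hslen : s < h.length) (hspar : (s-1)/2 = pos) (hsne : s ≠ childSel h pos) :
    hget h (childSel h pos) ≤ hget h s := by
  by_cases hcond : 2*pos+1+1 < h.length ∧ ¬ (hget h (2*pos+1) < hget h (2*pos+1+1))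
  · have hcpe : childSel h pos = 2*pos+1+1 := by unfold childSel; rw [if_pos hcond]
    rw [hcpe] at hsne
    have hse : s = 2*pos+1 := by omega
    obtain ⟨-, h2⟩ := hcond
    rw [hcpe, hse]; omega
  · have hcpe : childSel h pos = 2*pos+1 := by unfold childSel; rw [if_neg hcond]
    rw [hcpe] at hsne
    have hse : s = 2*pos+1+1 := by omega
    rw [hcpe, hse]
    by_cases h2 : 2*pos+1+1 < h.length
    · have := not_and.mp hcond h2
      omega
    · omega

theorem siftdownF_perm (fuel : Nat) :
    ∀ (h : List Int) (pos : Nat) (newitem : Int), pos ≤ fuel → pos < h.length →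
    (siftdownF fuel h pos newitem).Perm (h.set pos newitem) := by
  induction fuel with
  | zero =>
    intro h pos newitem hf hp
    rw [siftdownF]
  | succ n ih =>
    intro h pos newitem hf hp
    rw [siftdownF]
    split
    · next hpos =>
      split
      · next hlt =>
        have hpp : (pos - 1) / 2 < pos := by omega
        have hlen : (pos - 1) / 2 < (h.set pos (hget h ((pos-1)/2))).length := by
          simp only [List.length_set]; omega
        exact (ih _ ((pos - 1) / 2) newitem (by omega) hlen).trans
          (transfer_perm h pos ((pos-1)/2) newitem (by omega) hp (by omega))
      · exact List.Perm.refl _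
    · exact List.Perm.refl _

theorem siftdown_perm (h : List Int) (pos : Nat) (newitem : Int) (hp : pos < h.length) :
    (siftdown h pos newitem).Perm (h.set pos newitem) := by
  unfold siftdown
  exact siftdownF_perm pos h pos newitem le_rfl hp

theorem siftupF_perm (fuel : Nat) :
    ∀ (h : List Int) (pos : Nat) (newitem : Int), h.length - pos ≤ fuel → pos < h.length →
    (siftupF fuel h pos newitem).Perm (h.set pos newitem) := by
  induction fuel with
  | zero => intro h pos newitem hf hp; omega
  | succ n ih =>
    intro h pos newitem hf hp
    rw [siftupF]
    split
    · next hc =>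
      have hcplt : childSel h pos < h.length := childSel_lt h pos hc
      have hcppos : pos < childSel h pos := childSel_gt h pos
      have hrec := ih (h.set pos (hget h (childSel h pos))) (childSel h pos) newitem
        (by simp only [List.length_set]; omega) (by simp only [List.length_set]; omega)
      have htr := transfer_perm h pos (childSel h pos) newitem (by omega) hp hcplt
      exact hrec.trans htr
    · next hc =>
      have := siftdown_perm (h.set pos newitem) pos newitem (by simpa using hp)
      simpa [List.set_set] using this

theorem siftup_perm (h : List Int) (pos : Nat) (newitem : Int) (hp : pos < h.length) :
    (siftup h pos newitem).Perm (h.set pos newitem) := by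
  unfold siftup
  exact siftupF_perm h.length h pos newitem (by omega) hp

-- precondition under which _siftdown produces a heap: heap everywhere except around the hole pos,
-- newitem fits below pos's children, and pos's children are ≥ pos's parent
def SD (h : List Int) (pos : Nat) (newitem : Int) : Prop :=
  (∀ c, 0 < c → c < h.length → (c-1)/2 ≠ pos → c ≠ pos → hget h ((c-1)/2) ≤ hget h c) ∧
  (∀ c, 0 < c → c < h.length → (c-1)/2 = pos → newitem ≤ hget h c) ∧
  (0 < pos → ∀ c, 0 < c → c < h.length → (c-1)/2 = pos → hget h ((pos-1)/2) ≤ hget h c)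

theorem siftdownF_heap (fuel : Nat) :
    ∀ (h : List Int) (pos : Nat) (newitem : Int), pos ≤ fuel → pos < h.length →
    SD h pos newitem → IsHeap (siftdownF fuel h pos newitem) := by
  induction fuel with
  | zero =>
    intro h pos newitem hf hp hsd
    obtain ⟨hA, hB, hC⟩ := hsd
    rw [siftdownF]
    intro c hc hclen
    simp only [List.length_set] at hclen
    by_cases hcpos : c = pos
    · omega
    · by_cases hparpos : (c-1)/2 = pos
      · rw [hget_set_ne h pos c _ (Ne.symm hcpos), hparpos, hget_set_self h pos _ hp]
        exact hB c hc hclen hparpos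
      · rw [hget_set_ne h pos c _ (Ne.symm hcpos), hget_set_ne h pos _ _ (Ne.symm hparpos)]
        exact hA c hc hclen hparpos hcpos
  | succ n ih =>
    intro h pos newitem hf hp hsd
    obtain ⟨hA, hB, hC⟩ := hsd
    rw [siftdownF]
    split
    · next hpos =>
      split
      · next hlt =>
        have hpplt : (pos - 1) / 2 < pos := by omega
        have hpplen : (pos - 1) / 2 < h.length := by omega
        refine ih (h.set pos (hget h ((pos-1)/2))) ((pos-1)/2) newitem (by omega)
          (by simp only [List.length_set]; omega) ⟨?_, ?_, ?_⟩
        · intro c hc hclen hpar hne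
          simp only [List.length_set] at hclen
          by_cases hcpos : c = pos
          · exact absurd (by omega : (c-1)/2 = (pos-1)/2) hpar
          · by_cases hparpos : (c-1)/2 = pos
            · rw [hget_set_ne h pos c _ (Ne.symm hcpos), hparpos, hget_set_self h pos _ hp]
              exact hC hpos c hc hclen hparpos
            · rw [hget_set_ne h pos c _ (Ne.symm hcpos), hget_set_ne h pos _ _ (Ne.symm hparpos)]
              exact hA c hc hclen hparpos hcpos
        · intro c hc hclen hpar
          simp only [List.length_set] at hclen
          by_cases hcpos : c = pos
          · rw [hcpos, hget_set_self h pos _ hp]; omega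
          · rw [hget_set_ne h pos c _ (Ne.symm hcpos)]
            have hAc := hA c hc hclen (by omega) hcpos
            rw [hpar] at hAc
            omega
        · intro hpppos c hc hclen hpar
          simp only [List.length_set] at hclen
          have hgpne : ((pos-1)/2 - 1) / 2 ≠ pos := by omega
          by_cases hcpos : c = pos
          · rw [hcpos, hget_set_self h pos _ hp, hget_set_ne h pos _ _ (Ne.symm hgpne)]
            exact hA ((pos-1)/2) (by omega) hpplen (by omega) (by omega)
          · rw [hget_set_ne h pos c _ (Ne.symm hcpos), hget_set_ne h pos _ _ (Ne.symm hgpne)]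
            have h1 : hget h (((pos-1)/2 - 1)/2) ≤ hget h ((pos-1)/2) :=
              hA ((pos-1)/2) (by omega) hpplen (by omega) (by omega)
            have h2 := hA c hc hclen (by omega) hcpos
            rw [hpar] at h2
            omega
      · next hge =>
        intro c hc hclen
        simp only [List.length_set] at hclen
        by_cases hcpos : c = pos
        · rw [hcpos, hget_set_self h pos _ hp,
              hget_set_ne h pos ((pos-1)/2) newitem (by omega)]
          omega
        · by_cases hparpos : (c-1)/2 = pos
          · rw [hget_set_ne h pos c _ (Ne.symm hcpos), hparpos, hget_set_self h pos _ hp]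
            exact hB c hc hclen hparpos
          · rw [hget_set_ne h pos c _ (Ne.symm hcpos), hget_set_ne h pos _ _ (Ne.symm hparpos)]
            exact hA c hc hclen hparpos hcpos
    · next hpos =>
      intro c hc hclen
      simp only [List.length_set] at hclen
      by_cases hcpos : c = pos
      · omega
      · by_cases hparpos : (c-1)/2 = pos
        · rw [hget_set_ne h pos c _ (Ne.symm hcpos), hparpos, hget_set_self h pos _ hp]
          exact hB c hc hclen hparpos
        · rw [hget_set_ne h pos c _ (Ne.symm hcpos), hget_set_ne h pos _ _ (Ne.symm hparpos)]
          exact hA c hc hclen hparpos hcpos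

theorem siftdown_heap (h : List Int) (pos : Nat) (newitem : Int)
    (hp : pos < h.length) (hsd : SD h pos newitem) :
    IsHeap (siftdown h pos newitem) := by
  unfold siftdown
  exact siftdownF_heap pos h pos newitem le_rfl hp hsd

-- precondition under which _siftup produces a heap: heap everywhere except around the hole pos,
-- and pos's children are ≥ pos's parent
def SU (h : List Int) (pos : Nat) : Prop :=
  (∀ c, 0 < c → c < h.length → (c-1)/2 ≠ pos → c ≠ pos → hget h ((c-1)/2) ≤ hget h c) ∧
  (0 < pos → ∀ c, 0 < c → c < h.length → (c-1)/2 = pos → hget h ((pos-1)/2) ≤ hget h c)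

theorem siftupF_heap (fuel : Nat) :
    ∀ (h : List Int) (pos : Nat) (newitem : Int), h.length - pos ≤ fuel → pos < h.length →
    SU h pos → IsHeap (siftupF fuel h pos newitem) := by
  induction fuel with
  | zero => intro h pos newitem hf hp _; omega
  | succ n ih =>
    intro h pos newitem hf hp hsu
    obtain ⟨hA, hD⟩ := hsu
    rw [siftupF]
    split
    · next hc =>
      have hcplt : childSel h pos < h.length := childSel_lt h pos hc
      have hcppos : pos < childSel h pos := childSel_gt h pos
      have hcpchild : (childSel h pos - 1) / 2 = pos := childSel_parent h pos
      have hcs : childSel (h.set pos (hget h (childSel h pos))) pos = childSel h pos := by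
        unfold childSel
        rw [hget_set_ne h pos _ _ (by omega), hget_set_ne h pos _ _ (by omega)]
        simp only [List.length_set]
      refine ih (h.set pos (hget h (childSel h pos))) (childSel h pos) newitem
        (by simp only [List.length_set]; omega)
        (by simp only [List.length_set]; omega) ⟨?_, ?_⟩
      · intro c hc' hclen hpar hne
        simp only [List.length_set] at hclen
        by_cases hcpos : c = pos
        · rw [hcpos, hget_set_self h pos _ hp,
              hget_set_ne h pos ((pos-1)/2) _ (by omega)]
          exact hD (by omega) (childSel h pos) (by omega) hcplt hcpchild
        · by_cases hparpos : (c-1)/2 = pos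
          · rw [hget_set_ne h pos c _ (Ne.symm hcpos), hparpos, hget_set_self h pos _ hp]
            exact childSel_min h pos c hc' hclen hparpos hne
          · rw [hget_set_ne h pos c _ (Ne.symm hcpos), hget_set_ne h pos _ _ (Ne.symm hparpos)]
            exact hA c hc' hclen hparpos hcpos
      · intro hcppos' c hc' hclen hpar
        simp only [List.length_set] at hclen
        have hcne : c ≠ pos := by omega
        rw [hget_set_ne h pos c _ (Ne.symm hcne), hcpchild, hget_set_self h pos _ hp]
        have hAc := hA c hc' hclen (by omega) hcne
        rw [hpar] at hAc
        exact hAc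
    · next hc =>
      apply siftdown_heap (h.set pos newitem) pos newitem (by simpa using hp)
      refine ⟨?_, ?_, ?_⟩
      · intro c hcpos hclen hpar hne
        simp only [List.length_set] at hclen
        rw [hget_set_ne h pos c _ (Ne.symm hne), hget_set_ne h pos _ _ (Ne.symm hpar)]
        exact hA c hcpos hclen hpar hne
      · intro c hcpos hclen hpar
        simp only [List.length_set] at hclen
        omega
      · intro hpos c hcpos hclen hpar
        simp only [List.length_set] at hclen
        omega

theorem siftup_heap (h : List Int) (pos : Nat) (newitem : Int)
    (hp : pos < h.length) (hsu : SU h pos) :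
    IsHeap (siftup h pos newitem) := by
  unfold siftup
  exact siftupF_heap h.length h pos newitem (by omega) hp hsu

theorem heap_root_min (h : List Int) (hh : IsHeap h) :
    ∀ i, i < h.length → hget h 0 ≤ hget h i := by
  intro i
  induction i using Nat.strong_induction_on with
  | _ i ih =>
    intro hi
    rcases Nat.eq_zero_or_pos i with h0 | h0
    · subst h0; omega
    · exact le_trans (ih ((i-1)/2) (by omega) (by omega)) (hh i h0 hi)

theorem heap_root_le_mem (h : List Int) (hh : IsHeap h) (y : Int) (hy : y ∈ h) :
    hget h 0 ≤ y := by
  obtain ⟨i, hi, rfl⟩ := List.mem_iff_getElem.mp hy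
  have h2 : hget h i = h[i] := List.getD_eq_getElem h 0 hi
  rw [← h2]
  exact heap_root_min h hh i hi

theorem hget_mem (h : List Int) (i : Nat) (hi : i < h.length) : hget h i ∈ h := by
  rw [hget, List.getD_eq_getElem h 0 hi]
  exact List.getElem_mem hi

theorem hget_append_left (h : List Int) (x : Int) (i : Nat) (hi : i < h.length) :
    hget (h ++ [x]) i = hget h i := by
  simp [hget, List.getD_eq_getElem?_getD, List.getElem?_append_left hi]

theorem heappush_perm (h : List Int) (x : Int) : (heappush h x).Perm (x :: h) := by
  unfold heappush
  have hp : h.length < (h ++ [x]).length := by simp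
  have hperm := siftdown_perm (h ++ [x]) h.length x hp
  have heq : (h ++ [x]).set h.length x = h ++ [x] := by
    apply List.ext_getElem (by simp)
    intro i hi1 hi2
    by_cases hix : i = h.length
    · subst hix; simp
    · rw [List.getElem_set_ne (Ne.symm hix)]
  rw [heq] at hperm
  exact hperm.trans (List.perm_append_singleton x h)

theorem heappush_heap (h : List Int) (x : Int) (hh : IsHeap h) : IsHeap (heappush h x) := by
  unfold heappush
  apply siftdown_heap (h ++ [x]) h.length x (by simp)
  refine ⟨?_, ?_, ?_⟩
  · intro c hc hclen hpar hne
    simp only [List.length_append, List.length_cons, List.length_nil] at hclen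
    have hclt : c < h.length := by omega
    rw [hget_append_left h x c hclt, hget_append_left h x _ (by omega)]
    exact hh c hc hclt
  · intro c hc hclen hpar
    simp only [List.length_append, List.length_cons, List.length_nil] at hclen
    omega
  · intro hpos c hc hclen hpar
    simp only [List.length_append, List.length_cons, List.length_nil] at hclen
    omega

theorem hget_dropLast (h : List Int) (i : Nat) (hi : i < h.length - 1) :
    hget h.dropLast i = hget h i := by
  have h1 : i < h.dropLast.length := by simp [List.length_dropLast]; omega
  have h2 : i < h.length := by omega
  rw [hget, hget, List.getD_eq_getElem _ 0 h1, List.getD_eq_getElem _ 0 h2]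
  exact List.getElem_dropLast h1

theorem heappop_spec (h : List Int) (hh : IsHeap h) (hne : 0 < h.length) :
    (heappop h).1 = hget h 0 ∧ ((heappop h).1 :: (heappop h).2).Perm h ∧ IsHeap (heappop h).2 := by
  unfold heappop
  by_cases hemp : h.dropLast.isEmpty
  · rw [if_pos hemp]
    have hlen1 : h.length = 1 := by
      rw [List.isEmpty_iff] at hemp
      have := congrArg List.length hemp
      simp [List.length_dropLast] at this
      omega
    obtain ⟨a, rfl⟩ := List.length_eq_one_iff.mp hlen1
    refine ⟨rfl, ?_, ?_⟩
    · simp [hget]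
    · intro c hc hclen; simp at hclen
  · rw [if_neg hemp]
    have hlen2 : 2 ≤ h.length := by
      rcases h with _ | ⟨a, _ | ⟨b, t⟩⟩
      · simp at hne
      · simp at hemp
      · simp only [List.length_cons]; omega
    have hrlen : h.dropLast.length = h.length - 1 := by simp [List.length_dropLast]
    have hr0 : hget h.dropLast 0 = hget h 0 := hget_dropLast h 0 (by omega)
    set last := hget h (h.length - 1) with hlast
    set rest := h.dropLast with hrest
    have hsetlen : (rest.set 0 last).length = h.length - 1 := by
      simp only [List.length_set]; omega
    constructor
    · exact hr0
    have hperm1 : (siftup (rest.set 0 last) 0 last).Perm ((rest.set 0 last).set 0 last) :=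
      siftup_perm _ 0 last (by omega)
    rw [List.set_set] at hperm1
    -- h = rest ++ [last]
    have hne' : h ≠ [] := List.ne_nil_of_length_pos hne
    have hhe : rest ++ [last] = h := by
      rw [hrest, hlast, hget, List.getD_eq_getElem _ 0 (by omega),
          ← List.getLast_eq_getElem hne']
      exact List.dropLast_concat_getLast hne'
    have hrne : rest ≠ [] := by
      intro hnil; rw [hnil] at hrlen; simp at hrlen; omega
    obtain ⟨r0, t, hrt⟩ := List.exists_cons_of_ne_nil hrne
    have hr0v : hget rest 0 = r0 := by rw [hrt]; simp [hget]
    have hset0 : rest.set 0 last = last :: t := by rw [hrt]; simp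
    constructor
    · -- permutation
      refine List.Perm.trans (List.Perm.cons _ hperm1) ?_
      rw [hset0, hr0v]
      have : (r0 :: last :: t).Perm (r0 :: (t ++ [last])) :=
        List.Perm.cons r0 (List.perm_append_singleton last t).symm
      refine this.trans ?_
      have : r0 :: (t ++ [last]) = (r0 :: t) ++ [last] := by simp
      rw [this, ← hrt, hhe]
    · -- heap property
      apply siftup_heap _ 0 last (by omega)
      constructor
      · intro c hc hclen hpar hne'
        simp only [List.length_set] at hclen
        rw [hget_set_ne _ 0 c _ (by omega), hget_set_ne _ 0 _ _ (by omega)]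
        rw [hget_dropLast h c (by omega), hget_dropLast h _ (by omega)]
        exact hh c hc (by omega)
      · intro h0; omega

-- the fold invariant: equal answers, A's heap is a heap and is a permutation of the negation of B's list
theorem fold_eq (nums : List Int) :
    ∀ (ans hA lB : List Int), IsHeap hA → hA.Perm (lB.map (fun v => -v)) →
    (List.foldl stepA (ans, hA) nums).1 = (List.foldl stepB (ans, lB) nums).1 := by
  induction nums with
  | nil => intro ans hA lB _ _; rfl
  | cons x xs ih =>
    intro ans hA lB hheap hperm
    simp only [List.foldl_cons]
    by_cases hx : x = 0
    · subst hx
      by_cases hemp : hA.length = 0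
      · have hBemp : lB = [] := by
          have := hperm.length_eq
          simp [hemp] at this
          exact List.eq_nil_of_length_eq_zero this.symm
        rw [show stepA (ans, hA) 0 = (ans ++ [-1], hA) by simp [stepA, hemp]]
        rw [show stepB (ans, lB) 0 = (ans ++ [-1], lB) by simp [stepB, hBemp]]
        exact ih _ _ _ hheap hperm
      · have hAne : 0 < hA.length := by omega
        have hBne : lB ≠ [] := by
          intro hnil; subst hnil; simp at hperm
          rw [hperm] at hAne; simp at hAne
        obtain ⟨hr, hpermpop, hheappop⟩ := heappop_spec hA hheap hAne
        obtain ⟨m, hm⟩ : ∃ m, PySem.List.max? lB (fun y => y) = some m := by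
          rcases hmx : PySem.List.max? lB (fun y => y) with _ | m
          · exact absurd ((PySem.List.max?_eq_none_iff lB (fun y => y)).mp hmx) hBne
          · exact ⟨m, rfl⟩
        have hmmem : m ∈ lB := PySem.List.max?_mem hm
        have hmmax : ∀ y ∈ lB, y ≤ m := by
          intro y hy; exact PySem.List.max?_isMax hm y hy
        -- (heappop hA).1 = -m
        have hrm : (heappop hA).1 = -m := by
          have hr_mem : (heappop hA).1 ∈ hA := by rw [hr]; exact hget_mem hA 0 hAne
          have hr_memB : (heappop hA).1 ∈ lB.map (fun v => -v) := hperm.mem_iff.mp hr_mem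
          obtain ⟨b, hb, hbr⟩ := List.mem_map.mp hr_memB
          have hnm_mem : -m ∈ hA := hperm.mem_iff.mpr (List.mem_map.mpr ⟨m, hmmem, rfl⟩)
          have h1 : (heappop hA).1 ≤ -m := by
            rw [hr]; exact heap_root_le_mem hA hheap _ hnm_mem
          have h2 : b ≤ m := hmmax b hb
          have hbr' : -b = (heappop hA).1 := hbr
          omega
        have hrem : (PySem.List.remove? lB m).getD lB = lB.erase m :=
          by rw [PySem.List.remove?_eq_some_erase lB m hmmem]; rfl
        rw [show stepA (ans, hA) 0 = (ans ++ [-(heappop hA).1], (heappop hA).2) by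
          simp [stepA, hemp]]
        rw [show stepB (ans, lB) 0 = (ans ++ [m], lB.erase m) by
          simp [stepB, List.isEmpty_iff, hBne, hm, hrem]]
        rw [hrm, neg_neg]
        apply ih
        · exact hheappop
        · -- (heappop hA).2 ~ (lB.erase m).map neg
          have hmapera : (lB.erase m).map (fun v => -v) = (lB.map (fun v => -v)).erase (-m) := by
            have hinj : Function.Injective (fun v : Int => -v) := fun a b hab => by
              simp at hab; omega
            exact List.map_erase hinj lB
          rw [hmapera]
          have hc : (lB.map (fun v => -v)).Perm (-m :: (lB.map (fun v => -v)).erase (-m)) :=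
            List.perm_cons_erase (List.mem_map.mpr ⟨m, hmmem, rfl⟩)
          have : ((heappop hA).1 :: (heappop hA).2).Perm (-m :: (lB.map (fun v => -v)).erase (-m)) :=
            (hpermpop.trans hperm).trans hc
          rw [hrm] at this
          exact this.cons_inv
    · rw [show stepA (ans, hA) x = (ans, heappush hA (-x)) by simp [stepA, hx]]
      rw [show stepB (ans, lB) x = (ans, lB ++ [x]) by simp [stepB, hx]]
      apply ih
      · exact heappush_heap hA (-x) hheap
      · have h1 : (heappush hA (-x)).Perm (-x :: hA) := heappush_perm hA (-x)
        have h2 : (-x :: hA).Perm (-x :: lB.map (fun v => -v)) := List.Perm.cons _ hperm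
        have h3 : (-x :: lB.map (fun v => -v)).Perm (lB.map (fun v => -v) ++ [-x]) :=
          (List.perm_append_singleton _ _).symm
        have h4 : lB.map (fun v => -v) ++ [-x] = (lB ++ [x]).map (fun v => -v) := by simp
        rw [h4] at h3
        exact (h1.trans h2).trans h3

-- ===== VERDICT (by name: the statement is the Claim_ definition above) =====
theorem solution_spec : Claim_equal_solution := by
  intro nums _
  unfold Spec_solution solution solution_alt
  exact fold_eq nums [] [] [] (by intro c hc hclen; simp at hclen) (by simp)
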